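-- pv_equiv track=rewrite | github.com/weltonvaz/beecrowd | 2140/main.py | verificar_troco
-- ===== SOURCE A (Python) =====
-- def verificar_troco(N, M):
--     notas = [2, 5, 10, 20, 50, 100]
--     troco = M - N
--
--     # Verifica todas as combinações de duas notas
--     for i in range(len(notas)):
--         for j in range(i, len(notas)):
--             if notas[i] + notas[j] == troco:
--                 return "possible"
--
--     return "impossible"
-- ===== SOURCE B (Python) =====
-- def verificar_troco(N, M):
--     notas = [2, 5, 10, 20, 50, 100]
--     notas_set = set(notas)
--     troco = M - N
--     return "possible" if any(troco - n in notas_set for n in notas) else "impossible"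
-- ===== Notes on version B (the rewrite author's own statement) =====
-- stated objective: simpler
-- what changed: Replaces the nested enumeration of note pairs with a single pass over the notes plus a set-membership test of the complement (troco - n).
import Mathlib
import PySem

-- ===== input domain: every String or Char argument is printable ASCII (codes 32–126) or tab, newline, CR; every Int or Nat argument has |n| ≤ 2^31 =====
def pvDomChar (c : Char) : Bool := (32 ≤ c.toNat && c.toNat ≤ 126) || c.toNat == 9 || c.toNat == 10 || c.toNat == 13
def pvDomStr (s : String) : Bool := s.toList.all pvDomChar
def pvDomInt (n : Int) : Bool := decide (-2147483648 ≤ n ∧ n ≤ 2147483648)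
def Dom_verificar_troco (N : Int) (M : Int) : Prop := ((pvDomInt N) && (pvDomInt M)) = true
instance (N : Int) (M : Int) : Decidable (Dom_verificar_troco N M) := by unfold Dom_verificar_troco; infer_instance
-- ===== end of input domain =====

-- B replaces A's nested pair enumeration by one pass over the notes with a set-membership
-- test of the complement (simpler).

-- ===== PORT A =====
-- outer loop 'for i in range(len(notas))', with early return on a hit in the inner loop
def aOuter (notas : List Int) (troco : Int) : List Int → Bool
  | [] => false
  | i :: is =>
      -- inner loop 'for j in range(i, len(notas)): if notas[i] + notas[j] == troco: return "possible"'
      if (PySem.List.pyRange i (notas.length : Int) 1).any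
           (fun j => (PySem.List.pyGetD notas i 0) + (PySem.List.pyGetD notas j 0) == troco)
      then true
      else aOuter notas troco is

def verificar_troco (N : Int) (M : Int) : String :=
  let notas : List Int := [2, 5, 10, 20, 50, 100]
  let troco := M - N
  if aOuter notas troco (PySem.List.pyRange 0 (notas.length : Int) 1) then "possible" else "impossible"

-- ===== PORT B =====
def verificar_troco_alt (N : Int) (M : Int) : String :=
  let notas : List Int := [2, 5, 10, 20, 50, 100]
  let notasSet : PySem.Set Int := PySem.Set.ofList notas
  let troco := M - N
  if notas.any (fun n => PySem.Set.contains notasSet (troco - n)) then "possible" else "impossible"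

-- ===== PRECONDITION & SPEC =====
def Spec_verificar_troco (N : Int) (M : Int) (out : String) : Prop := out = verificar_troco_alt N M
instance (N : Int) (M : Int) (out : String) : Decidable (Spec_verificar_troco N M out) := by unfold Spec_verificar_troco; infer_instance

-- ===== CLAIM (what is proved, stated in full; the proofs are below) =====
def Claim_equal_verificar_troco : Prop := ∀ (N : Int) (M : Int), Dom_verificar_troco N M → Spec_verificar_troco N M (verificar_troco N M)

-- ===== LEMMAS AND PROOFS =====

-- both loops decide the same condition on troco = M - N
lemma cond_eq (t : Int) :
    aOuter [2, 5, 10, 20, 50, 100] t (PySem.List.pyRange 0 6 1)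
      = [2, 5, 10, 20, 50, 100].any
          (fun n => PySem.Set.contains (PySem.Set.ofList [2, 5, 10, 20, 50, 100]) (t - n)) := by
  have hiff :
      (aOuter [2, 5, 10, 20, 50, 100] t (PySem.List.pyRange 0 6 1) = true) ↔
      ([2, 5, 10, 20, 50, 100].any
          (fun n => PySem.Set.contains (PySem.Set.ofList [2, 5, 10, 20, 50, 100]) (t - n)) = true) := by
    rw [show PySem.List.pyRange 0 6 1 = ([0,1,2,3,4,5] : List Int) from rfl]
    simp only [aOuter,
      show PySem.List.pyRange 0 6 1 = ([0,1,2,3,4,5] : List Int) from rfl,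
      show PySem.List.pyRange 1 6 1 = ([1,2,3,4,5] : List Int) from rfl,
      show PySem.List.pyRange 2 6 1 = ([2,3,4,5] : List Int) from rfl,
      show PySem.List.pyRange 3 6 1 = ([3,4,5] : List Int) from rfl,
      show PySem.List.pyRange 4 6 1 = ([4,5] : List Int) from rfl,
      show PySem.List.pyRange 5 6 1 = ([5] : List Int) from rfl,
      show ((([2, 5, 10, 20, 50, 100] : List Int).length : Int) = 6) from rfl,
      show PySem.List.pyGetD ([2,5,10,20,50,100] : List Int) 0 0 = 2 from rfl,
      show PySem.List.pyGetD ([2,5,10,20,50,100] : List Int) 1 0 = 5 from rfl,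
      show PySem.List.pyGetD ([2,5,10,20,50,100] : List Int) 2 0 = 10 from rfl,
      show PySem.List.pyGetD ([2,5,10,20,50,100] : List Int) 3 0 = 20 from rfl,
      show PySem.List.pyGetD ([2,5,10,20,50,100] : List Int) 4 0 = 50 from rfl,
      show PySem.List.pyGetD ([2,5,10,20,50,100] : List Int) 5 0 = 100 from rfl,
      show PySem.Set.ofList ([2,5,10,20,50,100] : List Int) = [2,5,10,20,50,100] from rfl,
      List.any_cons, List.any_nil, Bool.or_eq_true, beq_iff_eq,
      PySem.Set.contains, List.contains_eq_mem, List.mem_cons, List.not_mem_nil,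
      decide_eq_true_eq, Bool.false_eq_true, or_false, Bool.if_true_left,
      Bool.decide_or]
    constructor <;> intro h <;> omega
  cases h1 : aOuter [2, 5, 10, 20, 50, 100] t (PySem.List.pyRange 0 6 1) <;>
    cases h2 : [2, 5, 10, 20, 50, 100].any
        (fun n => PySem.Set.contains (PySem.Set.ofList [2, 5, 10, 20, 50, 100]) (t - n)) <;>
    simp_all

-- ===== VERDICT (by name: the statement is the Claim_ definition above) =====
theorem verificar_troco_spec : Claim_equal_verificar_troco := by
  intro N M _
  unfold Spec_verificar_troco verificar_troco verificar_troco_alt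
  simp only []
  rw [show ((([2, 5, 10, 20, 50, 100] : List Int).length : Int) = 6) by rfl]
  rw [cond_eq (M - N)]
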